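-- pv_equiv track=rewrite | github.com/davasquez/macheight | app.py | get_players_group_by_height
-- ===== SOURCE A (Python) =====
-- def get_players_group_by_height(players):
--     """Group all players based on the height in inches.
--
--     Return:
--     Dictionary where each key corresponds to players height and
--     the values correpond to a concatenated string of indexes, where
--     each index corresponds to a particular player.
--
--     Complexity: O(n)
--     """
--
--     players_group_by_height = {}
--     idx = 0
--     for p in players:
--         if not p['h_in'] in players_group_by_height:
--             players_group_by_height[p['h_in']] = '-' + str(idx) + ' '
--         else:
--             players_group_by_height[p['h_in']] += '-' + str(idx) + ' '
--         idx += 1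
--
--     return players_group_by_height
-- ===== SOURCE B (Python) =====
-- def get_players_group_by_height(players):
--     """Group all players based on the height in inches.
--
--     Different algorithm: first collect the distinct heights in order of
--     first appearance, then for each height rescan the whole player list
--     and join the formatted indexes of the players matching that height.
--     """
--     heights = []
--     for p in players:
--         h = p['h_in']
--         if h not in heights:
--             heights.append(h)
--     return {h: ''.join('-' + str(i) + ' '
--                        for i, p in enumerate(players) if p['h_in'] == h)
--             for h in heights}
-- ===== Notes on version B (the rewrite author's own statement) =====
-- stated objective: alternative
-- what changed: Replaces A's single-pass dict of growing strings with a distinct-heights pass followed by a per-height rescan of the whole list (group-by-repeated-filtering), trading A's O(n) dict accumulation for an O(n*k) nested scan with no dict at all.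
import Mathlib
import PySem

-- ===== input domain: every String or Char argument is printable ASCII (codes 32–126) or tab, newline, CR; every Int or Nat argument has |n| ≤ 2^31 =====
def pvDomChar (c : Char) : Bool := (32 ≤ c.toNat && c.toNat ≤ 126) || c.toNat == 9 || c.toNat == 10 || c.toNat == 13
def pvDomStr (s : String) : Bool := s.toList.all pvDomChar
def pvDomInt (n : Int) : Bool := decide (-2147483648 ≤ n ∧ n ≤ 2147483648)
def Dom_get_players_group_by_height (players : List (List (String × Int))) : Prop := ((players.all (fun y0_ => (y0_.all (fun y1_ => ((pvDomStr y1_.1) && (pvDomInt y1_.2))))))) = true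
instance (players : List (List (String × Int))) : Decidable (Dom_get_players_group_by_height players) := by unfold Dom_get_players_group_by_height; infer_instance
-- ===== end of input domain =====

-- B replaces A's single dict-accumulating pass by a distinct-heights pass followed by a per-height rescan (group by repeated filtering); return values proved equal on Pre_ (players whose dicts carry the 'h_in' key).


-- shared helpers: p['h_in'] lookup (Pre_ guarantees the key is present, so the
-- getD default is never reached inside Pre_) and the '-<idx> ' formatter
def pvH (p : List (String × Int)) : Int := ((PySem.Dict.mk p).get? "h_in").getD 0
def pvFmt (i : Int) : String := "-" ++ PySem.Int.toStr i ++ " "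

-- ===== PORT A =====
def get_players_group_by_height (players : List (List (String × Int))) : List (Int × String) :=
  (players.foldl
    (fun (st : PySem.Dict Int String × Int) p =>
      let d := st.1
      let idx := st.2
      let h := pvH p
      let d' := if d.contains h = false
                then d.insert h (pvFmt idx)
                else d.insert h (d.getD h "" ++ pvFmt idx)
      (d', idx + 1))
    (PySem.Dict.empty, 0)).1.items

-- ===== PORT B =====
-- first pass: distinct heights in first-appearance order; then for each height
-- rescan the enumerated players and join the formatted indexes that match it
def get_players_group_by_height_alt (players : List (List (String × Int))) : List (Int × String) :=
  let heights : List Int :=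
    players.foldl (fun hs p => let h := pvH p; if hs.contains h then hs else hs ++ [h]) []
  heights.map (fun h =>
    (h, PySem.Str.join ""
          (((PySem.List.enumerate players).filter (fun ip => pvH ip.2 == h)).map
            (fun ip => pvFmt ip.1))))

-- ===== PRECONDITION & SPEC =====
-- Pre_ excludes exactly the players dicts lacking the 'h_in' key, on which the Python A raises KeyError.
def Pre_get_players_group_by_height (players : List (List (String × Int))) : Prop :=
  ∀ p ∈ players, "h_in" ∈ p.map Prod.fst
instance (players : List (List (String × Int))) : Decidable (Pre_get_players_group_by_height players) := by unfold Pre_get_players_group_by_height; infer_instance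
def pvWitness_get_players_group_by_height : (List (List (String × Int))) :=
  [[("h_in", 70)], [("h_in", 72), ("w_lb", 180)], [("h_in", 70)]]
def Spec_get_players_group_by_height (players : List (List (String × Int))) (out : List (Int × String)) : Prop := out = get_players_group_by_height_alt players
instance (players : List (List (String × Int))) (out : List (Int × String)) : Decidable (Spec_get_players_group_by_height players out) := by unfold Spec_get_players_group_by_height; infer_instance

-- ===== CLAIM (what is proved, stated in full; the proofs are below) =====
def Claim_equal_get_players_group_by_height : Prop := ∀ (players : List (List (String × Int))), Dom_get_players_group_by_height players → Pre_get_players_group_by_height players → Spec_get_players_group_by_height players (get_players_group_by_height players)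

-- ===== LEMMAS AND PROOFS =====

-- ''.join over a cons
theorem join0_cons (x : String) (xs : List String) :
    PySem.Str.join "" (x :: xs) = x ++ PySem.Str.join "" xs := by
  cases xs with
  | nil =>
    apply String.toList_inj.mp
    simp [PySem.Str.toList_join, PySem.Chars.join_singleton]
  | cons y ys =>
    apply String.toList_inj.mp
    simp [PySem.Str.toList_join, PySem.Chars.join_cons_cons]

-- A's if/else branch IS a dict 'modify' with default ""
theorem stepA_eq_modify (d : PySem.Dict Int String) (h : Int) (e : String) :
    (if d.contains h = false then d.insert h e else d.insert h (d.getD h "" ++ e))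
      = d.modify h "" (· ++ e) := by
  by_cases hc : d.contains h = false
  · simp [hc, PySem.Dict.modify, PySem.Dict.getD_of_not_contains d "" hc]
  · simp [hc, PySem.Dict.modify]

-- per-key value of A's string-accumulating fold
theorem getD_foldl_modify_strappend (l : List (Int × String)) (d : PySem.Dict Int String) (c : Int) :
    (l.foldl (fun d p => d.modify p.1 "" (· ++ p.2)) d).getD c ""
      = d.getD c "" ++ PySem.Str.join "" ((l.filter (fun p => p.1 == c)).map (·.2)) := by
  induction l generalizing d with
  | nil =>
    apply String.toList_inj.mp
    simp [PySem.Str.join, PySem.Chars.join_nil]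
  | cons p rest ih =>
    simp only [List.foldl_cons, ih, List.filter_cons]
    rw [PySem.Dict.getD_modify]
    by_cases hp : c = p.1
    · simp [hp, join0_cons, String.append_assoc]
    · simp [hp, Ne.symm hp]

-- A's counter loop rewritten as a fold over enumerated (height, formatted-index) pairs
theorem A_loop (ps : List (List (String × Int))) (d : PySem.Dict Int String) (n : Int) :
    (ps.foldl
      (fun (st : PySem.Dict Int String × Int) p =>
        let d := st.1
        let idx := st.2
        let h := pvH p
        let d' := if d.contains h = false
                  then d.insert h (pvFmt idx)
                  else d.insert h (d.getD h "" ++ pvFmt idx)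
        (d', idx + 1))
      (d, n)).1
    = ((PySem.List.enumerate ps n).map (fun ip => (pvH ip.2, pvFmt ip.1))).foldl
        (fun d q => d.modify q.1 "" (· ++ q.2)) d := by
  induction ps generalizing d n with
  | nil => simp [PySem.List.enumerate_nil]
  | cons p rest ih =>
    simp only [List.foldl_cons, PySem.List.enumerate_cons, List.map_cons]
    rw [← stepA_eq_modify d (pvH p) (pvFmt n)]
    exact ih _ _

-- B's first pass is PySem.Set.update over the heights of the players
theorem B_heights (ps : List (List (String × Int))) (hs : List Int) :
    ps.foldl (fun hs p => let h := pvH p; if hs.contains h then hs else hs ++ [h]) hs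
      = PySem.Set.update hs (ps.map pvH) := by
  induction ps generalizing hs with
  | nil => simp [PySem.Set.update]
  | cons p rest ih =>
    simp only [List.foldl_cons, List.map_cons, PySem.Set.update, List.foldl_cons] at *
    rw [ih]
    rfl

theorem get_players_group_by_height_spec : Claim_equal_get_players_group_by_height := by
  intro players _ _
  unfold Spec_get_players_group_by_height
  unfold get_players_group_by_height get_players_group_by_height_alt
  dsimp only
  rw [A_loop, B_heights]
  set stuff : List (Int × String) :=
    (PySem.List.enumerate players).map (fun ip => (pvH ip.2, pvFmt ip.1)) with hstuff
  set dA := stuff.foldl (fun d q => d.modify q.1 "" (· ++ q.2)) PySem.Dict.empty with hdA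
  have hmapfst : stuff.map Prod.fst = players.map pvH := by
    rw [hstuff, List.map_map]
    have hc : (Prod.fst ∘ fun ip : Int × List (String × Int) => (pvH ip.2, pvFmt ip.1))
        = pvH ∘ (·.2) := rfl
    rw [hc, ← List.map_map, PySem.List.map_snd_enumerate]
  have hkA : dA.keys = PySem.Set.update [] (players.map pvH) := by
    rw [hdA, ← hmapfst]
    simpa using PySem.Dict.keys_foldl_modify_key stuff Prod.fst ""
      (fun _ q s => s ++ q.2) PySem.Dict.empty
  have hndA : dA.keys.Nodup := by
    rw [hdA]
    exact PySem.Dict.nodup_keys_foldl_modify_key _ Prod.fst "" (fun _ q s => s ++ q.2) _ (by simp)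
  have hval : ∀ h : Int, dA.getD h ""
      = PySem.Str.join ""
          (((PySem.List.enumerate players).filter (fun ip => pvH ip.2 == h)).map
            (fun ip => pvFmt ip.1)) := by
    intro h
    rw [hdA, getD_foldl_modify_strappend, hstuff, List.filter_map]
    have hcomp : ((fun p : Int × String => p.1 == h) ∘ (fun ip : Int × (List (String × Int)) => (pvH ip.2, pvFmt ip.1)))
        = (fun ip : Int × (List (String × Int)) => pvH ip.2 == h) := rfl
    simp [hcomp, List.map_map, PySem.Dict.getD_empty, String.empty_append]
    rfl
  rw [PySem.Dict.items_eq_map_keys dA hndA "", hkA]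
  exact List.map_congr_left (fun h _ => by simp [hval h])
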